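-- pv_equiv track=rewrite | github.com/puhakkaJ/NOKIA_daily_coding_challenges | 20210526/box.py | make_box
-- ===== SOURCE A (Python) =====
-- from typing import List
--
-- def make_box(dim: int) -> List[str]:
--     end_line = "#" * dim
--     box = [end_line]
--
--     for i in range(2, dim + 1):
--         if (i % dim == 0):
--             line = end_line
--         else:
--             line = "#" + (" " * (dim - 2)) + "#"
--
--         box.append(line)
--
--     return  box
-- ===== SOURCE B (Python) =====
-- def make_box(dim: int):
--     if dim < 2:
--         return ["#" * dim]
--     end_line = "#" * dim
--     middle = "#" + " " * (dim - 2) + "#"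
--     return [end_line] + [middle] * (dim - 2) + [end_line]
-- ===== Notes on version B (the rewrite author's own statement) =====
-- stated objective: simpler
-- what changed: B replaces the per-row loop with its i%dim test by one closed-form expression: guard dim<2, then build the box as [end]+[middle]*(dim-2)+[end] by list replication.
import Mathlib
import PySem

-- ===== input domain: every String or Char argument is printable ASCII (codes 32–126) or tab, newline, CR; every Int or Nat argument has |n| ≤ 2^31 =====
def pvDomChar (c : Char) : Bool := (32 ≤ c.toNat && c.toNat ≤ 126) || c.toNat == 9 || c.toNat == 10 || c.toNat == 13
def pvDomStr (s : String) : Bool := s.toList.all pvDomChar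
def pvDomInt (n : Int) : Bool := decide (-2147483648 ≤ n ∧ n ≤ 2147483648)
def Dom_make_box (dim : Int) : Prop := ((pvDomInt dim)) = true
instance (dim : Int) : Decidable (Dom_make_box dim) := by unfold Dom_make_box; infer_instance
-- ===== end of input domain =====

-- B builds the box by one closed-form replication instead of A's row loop with its i % dim test.

-- ===== PORT A =====
-- "s" * n is ported as PySem.List.pyRepeat on the character list (exact: negative n gives []).
def make_box (dim : Int) : List String :=
  let end_line := String.ofList (PySem.List.pyRepeat ['#'] dim)
  let box := [end_line]
  (PySem.List.pyRange 2 (dim + 1) 1).foldl (fun box i =>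
    let line := if PySem.Int.mod i dim = 0 then end_line
                else String.ofList (['#'] ++ PySem.List.pyRepeat [' '] (dim - 2) ++ ['#'])
    box ++ [line]) box

-- ===== PORT B =====
def make_box_alt (dim : Int) : List String :=
  if dim < 2 then [String.ofList (PySem.List.pyRepeat ['#'] dim)]
  else
    let end_line := String.ofList (PySem.List.pyRepeat ['#'] dim)
    let middle := String.ofList (['#'] ++ PySem.List.pyRepeat [' '] (dim - 2) ++ ['#'])
    [end_line] ++ PySem.List.pyRepeat [middle] (dim - 2) ++ [end_line]

-- ===== PRECONDITION & SPEC =====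
def Spec_make_box (dim : Int) (out : List String) : Prop := out = make_box_alt dim
instance (dim : Int) (out : List String) : Decidable (Spec_make_box dim out) := by unfold Spec_make_box; infer_instance

-- ===== CLAIM (what is proved, stated in full; the proofs are below) =====
def Claim_equal_make_box : Prop := ∀ (dim : Int), Dom_make_box dim → Spec_make_box dim (make_box dim)

-- ===== LEMMAS AND PROOFS =====

theorem map_line_const {α : Type} (dim : Int) (h : 2 ≤ dim) (mid endl : α) :
    (PySem.List.pyRange 2 dim 1).map
      (fun i => if PySem.Int.mod i dim = 0 then endl else mid) =
    List.replicate (dim - 2).toNat mid := by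
  have hlen : ((PySem.List.pyRange 2 dim 1).map
      (fun i => if PySem.Int.mod i dim = 0 then endl else mid)).length = (dim - 2).toNat := by
    simp [PySem.List.length_pyRange_one]
  rw [← hlen]
  apply List.eq_replicate_of_mem
  intro b hb
  simp only [List.mem_map] at hb
  obtain ⟨i, hi, rfl⟩ := hb
  rw [PySem.List.mem_pyRange_one] at hi
  have hdim : (0:Int) < dim := by omega
  have : PySem.Int.mod i dim = i := by
    rw [PySem.Int.mod_eq_emod_of_pos hdim]
    exact Int.emod_eq_of_lt (by omega) hi.2
  simp [this]
  omega

-- ===== VERDICT (by name: the statement is the Claim_ definition above) =====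
theorem make_box_spec : Claim_equal_make_box := by
  intro dim _
  unfold Spec_make_box make_box make_box_alt
  by_cases h : dim < 2
  · rw [if_pos h]
    simp [PySem.List.pyRange_one_eq_nil (by omega : dim + 1 ≤ 2)]
  · rw [if_neg h]
    rw [not_lt] at h
    rw [PySem.List.foldl_append_singleton_eq_map]
    rw [PySem.List.pyRange_one_append 2 dim (dim + 1) h (by omega),
        PySem.List.pyRange_one_singleton, List.map_append]
    rw [map_line_const dim h]
    have hself : PySem.Int.mod dim dim = 0 := by
      rw [PySem.Int.mod_eq_zero_iff_dvd]
    simp [hself, PySem.List.pyRepeat_singleton]
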